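-- pv_equiv track=rewrite | github.com/ShuvalovAnthony/ege | vars/vsosh/sch/4.py | f
-- ===== SOURCE A (Python) =====
-- def f(n, result):
--     if n == 0:  return result
--     elif n // 10 == 0: left = [1, 1, 1, 2, 2, 3, 3, 4, 3, 3][n]
--     else:
--         left = 1
--         right = n
--         while right - left > 1:
--             mid = (left + right) // 2
--             left += (mid - left) * (mid  <= (n + 1) // 2)
--             if left != mid:
--                 right = mid
--     return f(n - left, result + [left])
-- ===== SOURCE B (Python) =====
-- _LEFT = [1, 1, 1, 2, 2, 3, 3, 4, 3, 3]
--
-- def f(n, result):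
--     out = list(result)
--     while n > 0:
--         left = _LEFT[n] if n < 10 else (n + 1) // 2
--         out.append(left)
--         n -= left
--     return out
-- ===== Notes on version B (the rewrite author's own statement) =====
-- stated objective: faster
-- what changed: replaced the recursive descent with an iterative accumulator loop and replaced the inner binary search for the largest mid <= (n+1)//2 with the direct formula (n+1)//2
import Mathlib
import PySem

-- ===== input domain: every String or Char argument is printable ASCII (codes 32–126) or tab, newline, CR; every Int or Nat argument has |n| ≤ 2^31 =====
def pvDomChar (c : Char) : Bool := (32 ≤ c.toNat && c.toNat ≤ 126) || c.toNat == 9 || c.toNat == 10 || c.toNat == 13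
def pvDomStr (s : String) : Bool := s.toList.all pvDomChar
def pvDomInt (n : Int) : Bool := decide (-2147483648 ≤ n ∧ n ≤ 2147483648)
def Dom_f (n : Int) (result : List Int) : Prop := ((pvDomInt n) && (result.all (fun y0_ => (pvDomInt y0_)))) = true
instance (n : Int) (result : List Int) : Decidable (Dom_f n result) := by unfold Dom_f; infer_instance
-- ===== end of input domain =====

-- B replaces A's recursion + inner binary search by an iterative loop using the direct
-- formula (n+1)//2; measured faster (asymptotically fewer arithmetic steps per emitted element).

-- ===== PORT A =====
def fTable : List Int := [1, 1, 1, 2, 2, 3, 3, 4, 3, 3]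

-- A's inner `while right - left > 1` loop, step for step.
def fSearch (n left right : Int) : Int :=
  if right - left > 1 then
    let mid := PySem.Int.floordiv (left + right) 2
    let left' := left + (mid - left) * (if mid ≤ PySem.Int.floordiv (n + 1) 2 then 1 else 0)
    if left' ≠ mid then fSearch n left' mid else fSearch n left' right
  else left
termination_by (right - left).toNat
decreasing_by
  all_goals
    have hm : PySem.Int.floordiv (left + right) 2 = (left + right) / 2 :=
      PySem.Int.floordiv_eq_ediv_of_pos (by omega)
  all_goals simp only [left', mid] at *
  all_goals split_ifs at * <;> omega

-- A's recursion, with a fuel counter only to make it total in Lean; for n ≥ 0 the fuel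
-- n.toNat never runs out (each step strictly decreases n); for n < 0 Python A diverges.
def fAux (fuel : Nat) (n : Int) (result : List Int) : List Int :=
  if n == 0 then result
  else
    match fuel with
    | 0 => result
    | fuel' + 1 =>
      -- index n is in [0,9] whenever this branch runs with n ≥ 0, so the `.getD 0` default is unreachable
      let left := if PySem.Int.floordiv n 10 == 0
        then (PySem.List.pyGet? fTable n).getD 0
        else fSearch n 1 n
      fAux fuel' (n - left) (result ++ [left])

def f (n : Int) (result : List Int) : List Int := fAux n.toNat n result

-- ===== PORT B =====
def fAltTable : List Int := [1, 1, 1, 2, 2, 3, 3, 4, 3, 3]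

-- B's `while n > 0` loop; fuel n.toNat makes it total and never runs out (n strictly decreases).
def fAltAux (fuel : Nat) (n : Int) (out : List Int) : List Int :=
  if n > 0 then
    match fuel with
    | 0 => out
    | fuel' + 1 =>
      let left := if n < 10
        then (PySem.List.pyGet? fAltTable n).getD 0
        else PySem.Int.floordiv (n + 1) 2
      fAltAux fuel' (n - left) (out ++ [left])
  else out

def f_alt (n : Int) (result : List Int) : List Int := fAltAux n.toNat n result

-- ===== PRECONDITION & SPEC =====
-- For n < 0 Python A recurses on n-1 forever (RecursionError), so Pre_ excludes n < 0.
def Pre_f (n : Int) (result : List Int) : Prop := 0 ≤ n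
instance (n : Int) (result : List Int) : Decidable (Pre_f n result) := by unfold Pre_f; infer_instance
def pvWitness_f : Int × List Int := (37, [1, 2])

def Spec_f (n : Int) (result : List Int) (out : List Int) : Prop := out = f_alt n result
instance (n : Int) (result : List Int) (out : List Int) : Decidable (Spec_f n result out) := by unfold Spec_f; infer_instance

-- ===== CLAIM (what is proved, stated in full; the proofs are below) =====
def Claim_equal_f : Prop := ∀ (n : Int) (result : List Int), Dom_f n result → Pre_f n result → Spec_f n result (f n result)

-- ===== LEMMAS AND PROOFS =====

-- A's binary search computes exactly the midpoint formula (n+1)//2.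
lemma fSearch_eq (k : Nat) : ∀ (n left right : Int), (right - left).toNat ≤ k →
    left ≤ PySem.Int.floordiv (n + 1) 2 → PySem.Int.floordiv (n + 1) 2 < right →
    fSearch n left right = PySem.Int.floordiv (n + 1) 2 := by
  induction k with
  | zero =>
    intro n left right hk h1 h2
    rw [fSearch]
    have : ¬ (right - left > 1) := by omega
    simp only [this, if_false]
    omega
  | succ k ih =>
    intro n left right hk h1 h2
    rw [fSearch]
    by_cases hgt : right - left > 1
    · simp only [hgt, if_true]
      have hm : PySem.Int.floordiv (left + right) 2 = (left + right) / 2 :=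
        PySem.Int.floordiv_eq_ediv_of_pos (by omega)
      have hlo : left < PySem.Int.floordiv (left + right) 2 := by omega
      have hhi : PySem.Int.floordiv (left + right) 2 < right := by omega
      by_cases hc : PySem.Int.floordiv (left + right) 2 ≤ PySem.Int.floordiv (n + 1) 2
      · simp only [hc, if_true, mul_one]
        have he : left + (PySem.Int.floordiv (left + right) 2 - left)
            = PySem.Int.floordiv (left + right) 2 := by ring
        rw [he]
        simp only [ne_eq, not_true_eq_false, if_false]
        exact ih n _ right (by omega) hc h2
      · simp only [hc, if_false, mul_zero, add_zero]
        have hne : left ≠ PySem.Int.floordiv (left + right) 2 := by omega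
        simp only [ne_eq, hne, not_false_eq_true, if_true]
        exact ih n left _ (by omega) h1 (by omega)
    · simp only [hgt, if_false]
      omega

-- The two loops agree step for step for n ≥ 0, with any (shared) fuel.
lemma aux_eq (fuel : Nat) : ∀ (n : Int) (acc : List Int), 0 ≤ n →
    fAux fuel n acc = fAltAux fuel n acc := by
  induction fuel with
  | zero =>
    intro n acc hn
    rw [fAux, fAltAux]
    by_cases h : n = 0 <;> simp [h] <;> omega
  | succ fuel ih =>
    intro n acc hn
    rw [fAux, fAltAux]
    by_cases h0 : n = 0
    · simp [h0]
    · have hpos : 0 < n := by omega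
      simp only [beq_iff_eq, h0, if_false, hpos, if_true]
      by_cases hlt : n < 10
      · have hd : PySem.Int.floordiv n 10 = 0 := by
          rw [PySem.Int.floordiv_eq_ediv_of_pos (by omega)]; omega
        have hle : (PySem.List.pyGet? fTable n).getD 0 ≤ n
            ∧ (PySem.List.pyGet? fTable n).getD 0 = (PySem.List.pyGet? fAltTable n).getD 0 := by
          interval_cases n <;> constructor <;> decide
        simp only [hd, hlt, if_true, beq_self_eq_true]
        rw [← hle.2]
        exact ih _ _ (by omega)
      · have hd : PySem.Int.floordiv n 10 ≠ 0 := by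
          rw [PySem.Int.floordiv_eq_ediv_of_pos (by omega)]; omega
        have hT : PySem.Int.floordiv (n + 1) 2 = (n + 1) / 2 :=
          PySem.Int.floordiv_eq_ediv_of_pos (by omega)
        have hs : fSearch n 1 n = PySem.Int.floordiv (n + 1) 2 :=
          fSearch_eq (n - 1).toNat n 1 n (by omega) (by omega) (by omega)
        simp only [beq_iff_eq, hd, if_false, hlt, hs]
        exact ih _ _ (by omega)

-- ===== VERDICT (by name: the statement is the Claim_ definition above) =====
theorem f_spec : Claim_equal_f := by
  intro n result _ hpre
  unfold Spec_f f f_alt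
  exact aux_eq n.toNat n result hpre
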